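-- pv_equiv track=rewrite | github.com/raulfauste/DAA | Ejercicios/RecursividadLineal.py | insertar
-- ===== SOURCE A (Python) =====
-- def insertar(n,num):
--     r = n%10
--     if r==0:
--         return num
--     elif r<=num:
--         return n*10 + num
--     else:
--         return 10*insertar(n//10,num)+n%10
-- ===== SOURCE B (Python) =====
-- def insertar(n, num):
--     # iterative: strip digits greater than num onto a stack, then rebuild
--     stack = []
--     r = n % 10
--     while r != 0 and r > num:
--         stack.append(r)
--         n //= 10
--         r = n % 10
--     base = num if r == 0 else n * 10 + num
--     for d in reversed(stack):
--         base = base * 10 + d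
--     return base
-- ===== Notes on version B (the rewrite author's own statement) =====
-- stated objective: alternative
-- what changed: Replaces the linear recursion by an explicit loop that pushes stripped digits onto a stack and a second loop that pops them back onto the rebuilt number.
-- outside the precondition, e.g. on insertar(-91, 0): A returns 9, B returns 9
import Mathlib
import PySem

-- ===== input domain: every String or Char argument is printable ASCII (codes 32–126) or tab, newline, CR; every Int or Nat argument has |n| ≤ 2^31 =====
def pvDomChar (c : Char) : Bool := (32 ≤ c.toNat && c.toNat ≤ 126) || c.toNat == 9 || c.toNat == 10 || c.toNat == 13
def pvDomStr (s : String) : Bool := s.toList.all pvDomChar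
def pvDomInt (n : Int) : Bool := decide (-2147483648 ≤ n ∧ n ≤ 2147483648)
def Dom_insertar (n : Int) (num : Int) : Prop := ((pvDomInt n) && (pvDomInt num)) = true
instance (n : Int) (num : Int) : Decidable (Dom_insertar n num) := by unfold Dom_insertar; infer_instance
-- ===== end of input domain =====

-- B replaces the linear recursion by an explicit digit stack plus a rebuild loop (same cost, no call stack).


-- ===== PORT A =====
-- Python's recursion diverges for negative n (excluded by Pre_); fuel only makes the
-- same recursion total in Lean, it is never exhausted on inputs satisfying Pre_.
def insertarFuel : Nat → Int → Int → Int
  | 0, _, num => num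
  | fuel + 1, n, num =>
    let r := PySem.Int.mod n 10
    if r = 0 then num
    else if r ≤ num then n * 10 + num
    else 10 * insertarFuel fuel (PySem.Int.floordiv n 10) num + PySem.Int.mod n 10

def insertar (n : Int) (num : Int) : Int := insertarFuel (n.natAbs + 1) n num

-- ===== PORT B =====
-- the while loop: strip digits r = n % 10 with r ≠ 0 and r > num onto the stack
-- (fuel as above: never exhausted on inputs satisfying Pre_)
def insertarAltLoop : Nat → Int → Int → List Int → List Int × Int
  | 0, n, _, stack => (stack, n)
  | fuel + 1, n, num, stack =>
    let r := PySem.Int.mod n 10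
    if r ≠ 0 ∧ r > num then
      insertarAltLoop fuel (PySem.Int.floordiv n 10) num (stack ++ [r])
    else (stack, n)

def insertar_alt (n : Int) (num : Int) : Int :=
  let p := insertarAltLoop (n.natAbs + 1) n num []
  let r := PySem.Int.mod p.2 10
  let base := if r = 0 then num else p.2 * 10 + num
  p.1.reverse.foldl (fun b d => b * 10 + d) base

-- ===== PRECONDITION & SPEC =====
-- Pre_ admits all n ≥ 0 (the natural domain) plus negative n that return without recursing;
-- it excludes the remaining negative n, on most of which Python A's floor-division peeling
-- diverges (RecursionError) — and where such an n happens to return, B agrees anyway.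
def Pre_insertar (n : Int) (num : Int) : Prop :=
  0 ≤ n ∨ PySem.Int.mod n 10 = 0 ∨ PySem.Int.mod n 10 ≤ num
instance (n : Int) (num : Int) : Decidable (Pre_insertar n num) := by unfold Pre_insertar; infer_instance
def pvWitness_insertar : Int × Int := (123, 5)

def Spec_insertar (n : Int) (num : Int) (out : Int) : Prop := out = insertar_alt n num
instance (n : Int) (num : Int) (out : Int) : Decidable (Spec_insertar n num out) := by unfold Spec_insertar; infer_instance

-- ===== CLAIM (what is proved, stated in full; the proofs are below) =====
def Claim_equal_insertar : Prop := ∀ (n : Int) (num : Int), Dom_insertar n num → Pre_insertar n num → Spec_insertar n num (insertar n num)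

-- ===== LEMMAS AND PROOFS =====

-- the loop only ever appends to its accumulator
theorem insertarAltLoop_stack (fuel : Nat) (n num : Int) (s : List Int) :
    insertarAltLoop fuel n num s =
      (s ++ (insertarAltLoop fuel n num []).1, (insertarAltLoop fuel n num []).2) := by
  induction fuel generalizing n s with
  | zero => simp [insertarAltLoop]
  | succ fuel ih =>
    simp only [insertarAltLoop]
    split_ifs with h
    · simp only [List.nil_append]
      rw [ih, ih (PySem.Int.floordiv n 10) [PySem.Int.mod n 10]]
      simp
    · simp

theorem insertarFuel_eq (fuel : Nat) (n num : Int) (hn : 0 ≤ n) (hf : n.natAbs < fuel) :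
    insertarFuel fuel n num =
      (let p := insertarAltLoop fuel n num []
       let r := PySem.Int.mod p.2 10
       let base := if r = 0 then num else p.2 * 10 + num
       p.1.reverse.foldl (fun b d => b * 10 + d) base) := by
  induction fuel generalizing n with
  | zero => omega
  | succ fuel ih =>
    simp only [insertarFuel, insertarAltLoop]
    by_cases h0 : PySem.Int.mod n 10 = 0
    · have hcf : ¬ (PySem.Int.mod n 10 ≠ 0 ∧ PySem.Int.mod n 10 > num) := by
        intro hc; exact hc.1 h0
      rw [if_pos h0, if_neg hcf]
      simp only [if_pos h0, List.reverse_nil, List.foldl_nil]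
    · by_cases hle : PySem.Int.mod n 10 ≤ num
      · have hcf : ¬ (PySem.Int.mod n 10 ≠ 0 ∧ PySem.Int.mod n 10 > num) := by
          intro hc; omega
        rw [if_neg h0, if_pos hle, if_neg hcf]
        simp only [if_neg h0, List.reverse_nil, List.foldl_nil]
      · have hcond : PySem.Int.mod n 10 ≠ 0 ∧ PySem.Int.mod n 10 > num := ⟨h0, by omega⟩
        have hmod : PySem.Int.mod n 10 = n % 10 := PySem.Int.mod_eq_emod_of_pos (by omega)
        have hdiv : PySem.Int.floordiv n 10 = n / 10 := PySem.Int.floordiv_eq_ediv_of_pos (by omega)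
        have hnpos : 0 < n := by
          rcases lt_or_ge 0 n with h | h
          · exact h
          · exfalso; apply h0; rw [hmod]; omega
        have hq0 : 0 ≤ PySem.Int.floordiv n 10 := by rw [hdiv]; omega
        have hqlt : (PySem.Int.floordiv n 10).natAbs < fuel := by rw [hdiv]; omega
        rw [if_neg h0, if_neg hle, if_pos hcond]
        simp only [List.nil_append]
        rw [insertarAltLoop_stack fuel (PySem.Int.floordiv n 10) num [PySem.Int.mod n 10]]
        rw [ih (PySem.Int.floordiv n 10) hq0 hqlt]
        simp only [List.reverse_append, List.reverse_cons, List.reverse_nil, List.nil_append,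
          List.foldl_append, List.foldl_cons, List.foldl_nil]
        ring

-- fuel irrelevance above the digit count is baked in: insertar and insertar_alt both use n.natAbs + 1

-- negative n that return in the very first step (r = 0 or r ≤ num): no recursion, no loop iteration
theorem insertar_first_step (n num : Int)
    (h : PySem.Int.mod n 10 = 0 ∨ PySem.Int.mod n 10 ≤ num) :
    insertar n num = insertar_alt n num := by
  simp only [insertar, insertar_alt, insertarFuel, insertarAltLoop]
  by_cases h0 : PySem.Int.mod n 10 = 0
  · have hcf : ¬ (PySem.Int.mod n 10 ≠ 0 ∧ PySem.Int.mod n 10 > num) := by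
      intro hc; exact hc.1 h0
    rw [if_pos h0, if_neg hcf]
    simp only [if_pos h0, List.reverse_nil, List.foldl_nil]
  · have hle : PySem.Int.mod n 10 ≤ num := h.resolve_left h0
    have hcf : ¬ (PySem.Int.mod n 10 ≠ 0 ∧ PySem.Int.mod n 10 > num) := by
      intro hc; omega
    rw [if_neg h0, if_pos hle, if_neg hcf]
    simp only [if_neg h0, List.reverse_nil, List.foldl_nil]

-- ===== VERDICT (by name: the statement is the Claim_ definition above) =====
theorem insertar_spec : Claim_equal_insertar := by
  intro n num _ hpre
  unfold Spec_insertar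
  rcases hpre with h | h
  · unfold insertar insertar_alt
    exact insertarFuel_eq (n.natAbs + 1) n num h (by omega)
  · exact insertar_first_step n num h
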